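-- pv_equiv track=rewrite | github.com/predragf/symc | modules/assertiongenerators/cocosim/assertiongenerator.py | FindMaskedParameter
-- ===== SOURCE A (Python) =====
-- def FindMaskedParameter(maskedParentBlocks, parameter):
--     # Finds parameter value going through parent blocks recursively
--     for k, maskedParentBlock in enumerate(maskedParentBlocks):
--         if not (maskedParentBlock.get(parameter) is None):
--             parameter = maskedParentBlock.get(parameter)
--             if parameter.isnumeric():
--                 return parameter
--             else:
--                 return FindMaskedParameter(maskedParentBlocks[k+1:], parameter)
--
--     return parameter
-- ===== SOURCE B (Python) =====
-- def FindMaskedParameter(maskedParentBlocks, parameter):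
--     # Iterative: single index scan; on a hit resume from the next block (never restart).
--     i = 0
--     n = len(maskedParentBlocks)
--     while i < n:
--         val = maskedParentBlocks[i].get(parameter)
--         i += 1
--         if val is not None:
--             parameter = val
--             if parameter.isnumeric():
--                 return parameter
--     return parameter
-- ===== Notes on version B (the rewrite author's own statement) =====
-- stated objective: simpler
-- what changed: Replaced the recursion-on-a-slice (each hit recurses on maskedParentBlocks[k+1:], re-slicing the list) by a single iterative index scan that rebinds the parameter in place and keeps advancing, with no slicing and no call stack.
import Mathlib
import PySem

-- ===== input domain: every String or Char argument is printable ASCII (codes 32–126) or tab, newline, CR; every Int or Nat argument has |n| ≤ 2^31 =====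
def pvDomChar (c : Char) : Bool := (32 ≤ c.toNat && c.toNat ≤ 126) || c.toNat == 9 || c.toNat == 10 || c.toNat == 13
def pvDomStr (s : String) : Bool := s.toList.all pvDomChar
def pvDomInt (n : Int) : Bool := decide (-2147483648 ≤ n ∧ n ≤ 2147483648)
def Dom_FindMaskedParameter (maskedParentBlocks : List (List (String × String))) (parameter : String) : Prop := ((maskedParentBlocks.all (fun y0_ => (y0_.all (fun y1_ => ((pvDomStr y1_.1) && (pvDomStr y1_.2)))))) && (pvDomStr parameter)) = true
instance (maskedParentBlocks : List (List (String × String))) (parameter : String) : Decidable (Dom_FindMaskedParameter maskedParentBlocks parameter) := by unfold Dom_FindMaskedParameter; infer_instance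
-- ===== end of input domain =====

-- B replaces A's recursion-on-a-slice by a single iterative index scan (no slicing, no call stack); return values are proved equal on Dom.
-- Python's str.isnumeric is ported as PySem.Str.strIsdigit — exact on the printable-ASCII domain, where isnumeric and isdigit coincide.

-- ===== PORT A =====
-- recursion over the block list: a hit rebinds the parameter and recurses on the slice maskedParentBlocks[k+1:] (= the tail at the hit); no hit continues the scan
def FindMaskedParameter (maskedParentBlocks : List (List (String × String))) (parameter : String) : String :=
  match maskedParentBlocks with
  | [] => parameter
  | maskedParentBlock :: rest =>
    match (PySem.Dict.mk maskedParentBlock).get? parameter with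
    | some v =>
        if PySem.Str.strIsdigit v then v
        else FindMaskedParameter rest v
    | none => FindMaskedParameter rest parameter

-- ===== PORT B =====
-- iterative while-loop over an index i (ported as tail recursion on the index), rebinding parameter in place
def altGo (maskedParentBlocks : List (List (String × String))) (i : Nat) (parameter : String) : String :=
  if h : i < maskedParentBlocks.length then
    match (PySem.Dict.mk maskedParentBlocks[i]).get? parameter with
    | some v =>
        if PySem.Str.strIsdigit v then v
        else altGo maskedParentBlocks (i + 1) v
    | none => altGo maskedParentBlocks (i + 1) parameter
  else parameter
termination_by maskedParentBlocks.length - i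

def FindMaskedParameter_alt (maskedParentBlocks : List (List (String × String))) (parameter : String) : String :=
  altGo maskedParentBlocks 0 parameter

-- ===== PRECONDITION & SPEC =====
def Spec_FindMaskedParameter (maskedParentBlocks : List (List (String × String))) (parameter : String) (out : String) : Prop := out = FindMaskedParameter_alt maskedParentBlocks parameter
instance (maskedParentBlocks : List (List (String × String))) (parameter : String) (out : String) : Decidable (Spec_FindMaskedParameter maskedParentBlocks parameter out) := by unfold Spec_FindMaskedParameter; infer_instance

-- ===== CLAIM (what is proved, stated in full; the proofs are below) =====
def Claim_equal_FindMaskedParameter : Prop := ∀ (maskedParentBlocks : List (List (String × String))) (parameter : String), Dom_FindMaskedParameter maskedParentBlocks parameter → Spec_FindMaskedParameter maskedParentBlocks parameter (FindMaskedParameter maskedParentBlocks parameter)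

-- ===== LEMMAS AND PROOFS =====
theorem altGo_eq_drop (maskedParentBlocks : List (List (String × String))) (i : Nat) (parameter : String) :
    altGo maskedParentBlocks i parameter = FindMaskedParameter (maskedParentBlocks.drop i) parameter := by
  fun_induction altGo maskedParentBlocks i parameter with
  | case1 i param h v hv hd =>
      rw [List.drop_eq_getElem_cons h, FindMaskedParameter, hv]
      simp only [PySem.Str.strIsdigit_eq] at hd
      simp [hd]
  | case2 i param h v hv hd ih =>
      rw [List.drop_eq_getElem_cons h, FindMaskedParameter, hv]
      simp only [PySem.Str.strIsdigit_eq] at hd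
      simp [hd, ih]
  | case3 i param h hv ih =>
      rw [List.drop_eq_getElem_cons h, FindMaskedParameter, hv]
      simp [ih]
  | case4 i param h =>
      rw [List.drop_eq_nil_of_le (by omega), FindMaskedParameter]

-- ===== VERDICT (by name: the statement is the Claim_ definition above) =====
theorem FindMaskedParameter_spec : Claim_equal_FindMaskedParameter := by
  intro blocks param _
  unfold Spec_FindMaskedParameter FindMaskedParameter_alt
  rw [altGo_eq_drop, List.drop_zero]
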